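-- pv_equiv track=rewrite | github.com/jenjungjj/CS320-2023-Sum1-jenjung | assigns/04/MySolution/Python/assign04_04.py | wordle_hint
-- ===== SOURCE A (Python) =====
-- def wordle_hint(w1, w2):
--     word_hint = []
--     char_set = []
--     count = []
--
--     i = 0
--     while i < len(w1) and i < len(w2):
--         char1 = w1[i]
--         char2 = w2[i]
--
--         if char2 not in char_set:
--             char_set.append(char2)
--             count.append(w1.count(char2))
--
--         index = char_set.index(char2)
--
--         hint = 1 if char1 == char2 else (0 if count[index] == 0 else 2)
--         word_hint.append((hint, char2))
--         count[index] -= 1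
--
--         i += 1
--
--     return word_hint
-- ===== SOURCE B (Python) =====
-- def wordle_hint(w1, w2):
--     # Staged passes, no remaining-count state: (1) total counts of w1; (2) for each
--     # position, the number of earlier occurrences of w2[i] in w2; (3) a pure combine:
--     # a non-green position is grey exactly when total count == earlier-occurrence count.
--     n = min(len(w1), len(w2))
--     total = {}
--     for ch in w1:
--         total[ch] = total.get(ch, 0) + 1
--     occ = []
--     seen = {}
--     for i in range(n):
--         c = w2[i]
--         occ.append(seen.get(c, 0))
--         seen[c] = seen.get(c, 0) + 1
--     return [(1 if w1[i] == w2[i] else (0 if total.get(w2[i], 0) == occ[i] else 2), w2[i])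
--             for i in range(n)]
-- ===== Notes on version B (the rewrite author's own statement) =====
-- stated objective: alternative
-- what changed: Replaces A's stateful remaining-count scan (char_set/count lists with membership, .index and w1.count scans, counts decremented in place) with three staged linear passes and a stateless classification rule: a totals dict over w1, an earlier-occurrence-index list over w2, then a pure combine where a non-green position is grey exactly when w1's total count of the letter equals its earlier-occurrence index; intended as faster (O(n) vs O(n*k)) but a timing run did not consistently confirm it.
import Mathlib
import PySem

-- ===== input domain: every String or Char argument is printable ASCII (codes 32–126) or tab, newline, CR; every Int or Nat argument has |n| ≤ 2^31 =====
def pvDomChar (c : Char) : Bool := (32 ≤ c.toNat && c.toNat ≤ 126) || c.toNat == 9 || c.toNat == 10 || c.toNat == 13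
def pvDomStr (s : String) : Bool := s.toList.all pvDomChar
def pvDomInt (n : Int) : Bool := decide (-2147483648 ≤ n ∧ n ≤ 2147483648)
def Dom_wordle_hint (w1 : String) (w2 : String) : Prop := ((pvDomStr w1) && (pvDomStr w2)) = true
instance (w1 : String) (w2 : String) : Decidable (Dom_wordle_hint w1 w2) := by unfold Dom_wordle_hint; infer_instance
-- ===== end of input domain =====

-- B replaces A's remaining-count scan (membership/.index/w1.count scans per position)
-- with staged linear passes and the rule 'grey iff w1's total count of the letter equals
-- its earlier-occurrence index in w2' (objective: alternative, avoiding the per-position scans).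

-- ===== PORT A =====
/-- A's `w1.count(char2)`: `char2` is a one-character string, so this is `str.count` with that needle. -/
def wordleCountA (w1 : String) (c : Char) : Int := (PySem.Str.count w1 (String.ofList [c]) : Int)

/-- A's while-loop (`while i < len(w1) and i < len(w2)` walks the aligned pairs);
state = (char_set, count, word_hint), exactly A's three lists. -/
def wordleALoop (w1 : String) : List (Char × Char) → List Char → List Int → List (Int × String) → List (Int × String)
  | [], _, _, wordHint => wordHint
  | (char1, char2) :: rest, charSet, count, wordHint =>
    let charSet' := if charSet.contains char2 then charSet else charSet ++ [char2]
    let count' := if charSet.contains char2 then count else count ++ [wordleCountA w1 char2]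
    -- char2 ∈ charSet' always holds here, so Python's `.index` cannot raise; `.getD 0` is never the default
    let index := (PySem.List.index? charSet' char2).getD 0
    let cnt := count'.getD index 0
    let hint : Int := if char1 == char2 then 1 else (if cnt == 0 then 0 else 2)
    wordleALoop w1 rest charSet' (count'.set index (cnt - 1)) (wordHint ++ [(hint, String.ofList [char2])])

def wordle_hint (w1 : String) (w2 : String) : List (Int × String) :=
  wordleALoop w1 (w1.toList.zip w2.toList) [] [] []

-- ===== PORT B =====
def wordle_hint_alt (w1 : String) (w2 : String) : List (Int × String) :=
  let l1 := w1.toList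
  let l2 := w2.toList
  let n : Nat := min l1.length l2.length
  -- pass 1: total[ch] for ch in w1
  let total := l1.foldl (fun d ch => d.insert ch (d.getD ch 0 + 1)) PySem.Dict.empty
  -- pass 2: the i-loop appending seen.get(c, 0) to occ, then bumping seen;
  -- every i is in range(n), so the exact indexing w2[i] is `getD` (never the default)
  let os := (PySem.List.pyRange 0 (n : Nat) 1).foldl
      (fun (st : List Int × PySem.Dict Char Int) i =>
        let c := l2.getD i.toNat ' '
        (st.1 ++ [st.2.getD c 0], st.2.insert c (st.2.getD c 0 + 1)))
      ([], PySem.Dict.empty)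
  let occ := os.1
  -- pass 3: the pure combining comprehension; total.get(w2[i], 0) is `getD`
  (PySem.List.pyRange 0 (n : Nat) 1).map (fun i =>
    let c2 := l2.getD i.toNat ' '
    ((if l1.getD i.toNat ' ' == c2 then (1 : Int)
      else if total.getD c2 0 == occ.getD i.toNat 0 then 0 else 2),
     String.ofList [c2]))

-- ===== PRECONDITION & SPEC =====
def Spec_wordle_hint (w1 : String) (w2 : String) (out : List (Int × String)) : Prop := out = wordle_hint_alt w1 w2
instance (w1 : String) (w2 : String) (out : List (Int × String)) : Decidable (Spec_wordle_hint w1 w2 out) := by unfold Spec_wordle_hint; infer_instance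

-- ===== CLAIM (what is proved, stated in full; the proofs are below) =====
def Claim_equal_wordle_hint : Prop := ∀ (w1 : String) (w2 : String), Dom_wordle_hint w1 w2 → Spec_wordle_hint w1 w2 (wordle_hint w1 w2)

-- ===== LEMMAS AND PROOFS =====

/-- Common abstract form both ports are reduced to: walk the aligned pairs carrying only
the prefix-count function `h`; `cnt` is the total-count function. -/
def wordleRef (cnt : Char → Int) : List (Char × Char) → (Char → Int) → List (Int × String)
  | [], _ => []
  | (c1, c2) :: rest, h =>
    ((if c1 == c2 then (1 : Int) else if cnt c2 == h c2 then 0 else 2), String.ofList [c2])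
      :: wordleRef cnt rest (fun c => if c = c2 then h c + 1 else h c)

lemma pvGetD_set_self (l : List Int) (i : Nat) (v : Int) (h : i < l.length) :
    (l.set i v).getD i 0 = v := by
  rw [List.getD_eq_getElem?_getD, List.getElem?_set_self h]
  rfl

lemma pvGetD_set_ne (l : List Int) (i j : Nat) (v : Int) (hne : i ≠ j) :
    (l.set i v).getD j 0 = l.getD j 0 := by
  rw [List.getD_eq_getElem?_getD, List.getElem?_set_ne hne, List.getD_eq_getElem?_getD]

lemma pvGetD_append_left (l t : List Int) (j : Nat) (hj : j < l.length) :
    (l ++ t).getD j 0 = l.getD j 0 := by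
  rw [List.getD_eq_getElem?_getD, List.getElem?_append_left hj, List.getD_eq_getElem?_getD]

lemma pvGetD_append_length (l : List Int) (v : Int) :
    (l ++ [v]).getD l.length 0 = v := by
  rw [List.getD_eq_getElem?_getD, List.getElem?_append_right (le_refl _)]
  simp

lemma pvBeqSubZero (a b : Int) : (a - b == 0) = (a == b) := by
  simp [sub_eq_zero]

/-- `count.go` with a single-character needle consumes one char per step and counts matches. -/
lemma countgo_singleton (c : Char) : ∀ (l : List Char) (fuel acc : Nat), l.length ≤ fuel →
    PySem.Chars.count.go [c] fuel l acc = acc + l.count c := by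
  intro l
  induction l with
  | nil =>
    intro fuel acc _
    cases fuel <;> simp [PySem.Chars.count.go]
  | cons x t ih =>
    intro fuel acc hle
    cases fuel with
    | zero => simp at hle
    | succ fuel =>
      have ht : t.length ≤ fuel := by simpa using hle
      by_cases hx : x = c
      · subst hx
        simp [PySem.Chars.count.go, List.isPrefixOf, ih fuel (acc + 1) ht]
        omega
      · have hpf : ([c].isPrefixOf (x :: t)) = false := by
          simp [List.isPrefixOf]
          exact fun h => (hx h.symm).elim
        simp [PySem.Chars.count.go, hpf, ih fuel acc ht, hx]

/-- `w1.count(c)` for a one-character needle is the character count of `w1`. -/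
lemma wordleCountA_eq (w : String) (c : Char) : wordleCountA w c = (List.count c w.toList : Int) := by
  unfold wordleCountA
  have h : PySem.Str.count w (String.ofList [c]) = List.count c w.toList := by
    simp only [PySem.Str.count_eq]
    unfold PySem.Chars.count
    rw [if_neg (by simp), String.toList_ofList]
    simpa using countgo_singleton c w.toList w.toList.length 0 (le_refl _)
  rw [h]

/-- The value A's (char_set, count) state associates with a character:
the stored remaining count if seen, else the untouched `w1.count`. -/
def wordleAVal (w1 : String) (charSet : List Char) (count : List Int) (c : Char) : Int :=
  ((PySem.List.index? charSet c).map (fun k => count.getD k 0)).getD (wordleCountA w1 c)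

/-- A's loop, under the invariant 'stored value = total count − prefix count `h`',
is the abstract walk `wordleRef`. -/
lemma wordleALoop_eq_ref (w1 : String) :
    ∀ (zs : List (Char × Char)) (charSet : List Char) (count : List Int)
      (acc : List (Int × String)) (h : Char → Int),
      charSet.Nodup → count.length = charSet.length →
      (∀ c, wordleAVal w1 charSet count c = wordleCountA w1 c - h c) →
      wordleALoop w1 zs charSet count acc = acc ++ wordleRef (wordleCountA w1) zs h := by
  intro zs
  induction zs with
  | nil => intro charSet count acc h _ _ _; simp [wordleALoop, wordleRef]
  | cons p rest ih =>
    obtain ⟨c1, c2⟩ := p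
    intro charSet count acc h hnd hlen hval
    by_cases hmem : c2 ∈ charSet
    · have hcont : charSet.contains c2 = true := by simpa using hmem
      obtain ⟨k, hk⟩ := Option.isSome_iff_exists.mp ((PySem.List.index?_isSome_iff charSet c2).mpr hmem)
      obtain ⟨hklt, hkc, _⟩ := PySem.List.getElem_of_index?_eq_some hk
      have hklen : k < count.length := hlen ▸ hklt
      have hcnt : count.getD k 0 = wordleCountA w1 c2 - h c2 := by
        have hv := hval c2
        simp only [wordleAVal, hk, Option.map_some, Option.getD_some] at hv
        exact hv
      simp only [wordleALoop, hcont, if_true, hk, Option.getD_some]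
      rw [ih _ _ _ (fun c => if c = c2 then h c + 1 else h c)]
      · simp only [wordleRef, hcnt, pvBeqSubZero, List.append_assoc, List.singleton_append]
      · exact hnd
      · simpa using hlen
      · intro c
        by_cases hc : c = c2
        · subst hc
          simp only [wordleAVal, hk, Option.map_some, Option.getD_some]
          rw [hcnt, pvGetD_set_self _ _ _ hklen]
          simp
          try ring
          try omega
        · have hvc := hval c
          simp only [wordleAVal] at hvc ⊢
          rw [if_neg hc]
          cases hidx : PySem.List.index? charSet c with
          | none => rw [hidx] at hvc; simpa using hvc
          | some j =>
            rw [hidx] at hvc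
            obtain ⟨hjlt, hjc, _⟩ := PySem.List.getElem_of_index?_eq_some hidx
            have hjk : k ≠ j := by
              intro heq; subst heq; exact hc (hjc.symm.trans hkc)
            simp only [Option.map_some, Option.getD_some] at hvc ⊢
            rw [hcnt, pvGetD_set_ne _ _ _ _ hjk]
            exact hvc
    · have hcont : charSet.contains c2 = false := by simpa using hmem
      have hidx2 : PySem.List.index? (charSet ++ [c2]) c2 = some charSet.length :=
        PySem.List.index?_append_singleton_self charSet c2 hmem
      have hcnt2 : (count ++ [wordleCountA w1 c2]).getD charSet.length 0 = wordleCountA w1 c2 := by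
        rw [← hlen]; exact pvGetD_append_length _ _
      have hr : wordleCountA w1 c2 = wordleCountA w1 c2 - h c2 := by
        have hv := hval c2
        simp only [wordleAVal, (PySem.List.index?_eq_none_iff charSet c2).mpr hmem,
          Option.map_none, Option.getD_none] at hv
        exact hv
      have hh0 : h c2 = 0 := by omega
      simp only [wordleALoop, hcont, Bool.false_eq_true, if_false, hidx2, Option.getD_some, hcnt2]
      rw [ih _ _ _ (fun c => if c = c2 then h c + 1 else h c)]
      · simp only [wordleRef, hh0, List.append_assoc, List.singleton_append]
      · simp only [List.nodup_append]
        refine ⟨hnd, List.nodup_singleton _, ?_⟩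
        intro x hx y hy hxy
        have hyc : y = c2 := by simpa using hy
        rw [hxy, hyc] at hx
        exact hmem hx
      · simp [hlen]
      · intro c
        by_cases hc : c = c2
        · subst hc
          simp only [wordleAVal, hidx2, Option.map_some, Option.getD_some]
          rw [← hlen, pvGetD_set_self _ _ _ (by simp)]
          simp [hh0]
          try ring
          try omega
        · have hvc := hval c
          simp only [wordleAVal] at hvc ⊢
          rw [if_neg hc]
          by_cases hcm : c ∈ charSet
          · obtain ⟨j, hj⟩ := Option.isSome_iff_exists.mp ((PySem.List.index?_isSome_iff charSet c).mpr hcm)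
            rw [PySem.List.index?_append_of_mem _ hcm, hj]
            rw [hj] at hvc
            obtain ⟨hjlt, _, _⟩ := PySem.List.getElem_of_index?_eq_some hj
            have hjlen : j < count.length := hlen ▸ hjlt
            simp only [Option.map_some, Option.getD_some] at hvc ⊢
            rw [← hlen, pvGetD_set_ne _ _ _ _ (by omega), pvGetD_append_left _ _ _ hjlen]
            exact hvc
          · have hnone : PySem.List.index? (charSet ++ [c2]) c = none := by
              rw [PySem.List.index?_eq_none_iff]
              simp [hcm, hc]
            rw [hnone]
            rw [(PySem.List.index?_eq_none_iff charSet c).mpr hcm] at hvc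
            simpa using hvc

/-- B's comprehension, read from index `k` on, is the abstract walk on the dropped
pair list with the prefix counts of `w2[:k]`. -/
lemma wordleB_eq_ref (l1 l2 : List Char) :
    ∀ (m k : Nat), k + m = min l1.length l2.length →
      ((PySem.List.pyRange (k : Int) (min l1.length l2.length : Nat) 1).map (fun i =>
        let c1 := l1.getD i.toNat ' '
        let c2 := l2.getD i.toNat ' '
        ((if c1 == c2 then (1 : Int)
          else if (l1.count c2 : Int) == ((l2.take i.toNat).count c2 : Int) then 0 else 2),
         String.ofList [c2])))
      = wordleRef (fun c => (l1.count c : Int)) ((l1.zip l2).drop k)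
          (fun c => (((l2.take k).count c : Int))) := by
  intro m
  induction m with
  | zero =>
    intro k hk
    rw [PySem.List.pyRange_one_eq_nil (by omega)]
    have : (l1.zip l2).drop k = [] := by
      apply List.drop_eq_nil_of_le
      simp [List.length_zip]; omega
    rw [this]
    rfl
  | succ m ih =>
    intro k hk
    have hkn : (k : Int) < ((min l1.length l2.length : Nat) : Int) := by
      push_cast; omega
    have hk1 : k < l1.length := by omega
    have hk2 : k < l2.length := by omega
    rw [PySem.List.pyRange_one_cons hkn, List.map_cons]
    have hdrop : (l1.zip l2).drop k = (l1[k], l2[k]) :: (l1.zip l2).drop (k + 1) := by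
      rw [List.drop_eq_getElem_cons (by simp [List.length_zip]; omega)]
      simp
    rw [hdrop]
    simp only [wordleRef]
    have hcast : ((k : Int) + 1) = ((k + 1 : Nat) : Int) := by push_cast; ring
    rw [hcast, ih (k + 1) (by omega)]
    have htoNat : ((k : Int)).toNat = k := Int.toNat_natCast k
    have hget1 : l1.getD k ' ' = l1[k] := List.getD_eq_getElem l1 ' ' hk1
    have hget2 : l2.getD k ' ' = l2[k] := List.getD_eq_getElem l2 ' ' hk2
    have htake : ∀ c, (l2.take (k + 1)).count c
        = (l2.take k).count c + (if l2[k] = c then 1 else 0) := by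
      intro c
      have ht : l2.take (k + 1) = l2.take k ++ [l2[k]] := by
        rw [List.take_add_one, List.getElem?_eq_getElem hk2]
        rfl
      rw [ht, List.count_append]
      simp [List.count_singleton, beq_iff_eq]
    simp only [htoNat, hget1, hget2]
    congr 1
    congr 1
    funext c
    by_cases hc : c = l2[k]
    · subst hc
      rw [if_pos rfl, htake _, if_pos rfl]
      push_cast
      ring
    · rw [if_neg hc, htake c, if_neg (fun h => hc h.symm)]
      simp

/-- `l.take (k+1)` appends the k-th element. -/
lemma pvTakeSucc (l : List Char) (k : Nat) (hk : k < l.length) :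
    l.take (k + 1) = l.take k ++ [l[k]] := by
  rw [List.take_add_one, List.getElem?_eq_getElem hk]
  rfl

/-- B's occurrence-index loop: after `k` steps, `occ` lists the earlier-occurrence
counts and `seen` is the counter of `w2[:k]`. -/
lemma occ_fold (l2 : List Char) : ∀ (k : Nat), k ≤ l2.length →
    (PySem.List.pyRange 0 (k : Nat) 1).foldl
      (fun (st : List Int × PySem.Dict Char Int) i =>
        let c := l2.getD i.toNat ' '
        (st.1 ++ [st.2.getD c 0], st.2.insert c (st.2.getD c 0 + 1)))
      ([], PySem.Dict.empty)
    = ((List.range k).map (fun j => (((l2.take j).count (l2.getD j ' ')) : Int)),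
       (l2.take k).foldl (fun d x => d.insert x (d.getD x 0 + 1)) PySem.Dict.empty) := by
  intro k
  induction k with
  | zero =>
    intro _
    rw [PySem.List.pyRange_one_eq_nil (by norm_num)]
    rfl
  | succ k ih =>
    intro hk
    have hklt : k < l2.length := by omega
    have hcast : (((k + 1 : Nat)) : Int) = (k : Int) + 1 := by push_cast; ring
    rw [hcast, PySem.List.pyRange_one_succ_right (by positivity), List.foldl_append,
      ih (by omega)]
    simp only [List.foldl_cons, List.foldl_nil, Int.toNat_natCast]
    have hgetk : l2.getD k ' ' = l2[k] := List.getD_eq_getElem l2 ' ' hklt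
    simp only [Prod.mk.injEq]
    constructor
    · rw [List.range_succ, List.map_append]
      simp [PySem.Dict.foldl_insert_getD_add_one_eq_counter, PySem.Dict.getD_counter]
    · rw [pvTakeSucc l2 k hklt, List.foldl_append]
      simp [List.getElem?_eq_getElem hklt]

-- ===== VERDICT (by name: the statement is the Claim_ definition above) =====
theorem wordle_hint_spec : Claim_equal_wordle_hint := by
  intro w1 w2 _
  unfold Spec_wordle_hint wordle_hint
  simp only [wordle_hint_alt]
  rw [wordleALoop_eq_ref w1 (w1.toList.zip w2.toList) [] [] [] (fun _ => 0)
    List.nodup_nil rfl (by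
      intro c
      simp only [wordleAVal, (PySem.List.index?_eq_none_iff ([] : List Char) c).mpr (by simp),
        Option.map_none, Option.getD_none]
      ring)]
  rw [occ_fold w2.toList (min w1.toList.length w2.toList.length) (by omega)]
  have hmap : ∀ i ∈ PySem.List.pyRange 0 ((min w1.toList.length w2.toList.length : Nat) : Int) 1,
      (let c2 := w2.toList.getD i.toNat ' '
       ((if w1.toList.getD i.toNat ' ' == c2 then (1 : Int)
         else if (w1.toList.foldl (fun d ch => d.insert ch (d.getD ch 0 + 1))
             PySem.Dict.empty).getD c2 0
             == ((List.range (min w1.toList.length w2.toList.length)).map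
                  (fun j => (((w2.toList.take j).count (w2.toList.getD j ' ')) : Int))).getD i.toNat 0
           then 0 else 2),
        String.ofList [c2]))
      = (let c1 := w1.toList.getD i.toNat ' '
         let c2 := w2.toList.getD i.toNat ' '
         ((if c1 == c2 then (1 : Int)
           else if (w1.toList.count c2 : Int)
               == ((w2.toList.take i.toNat).count c2 : Int) then 0 else 2),
          String.ofList [c2])) := by
    intro i hi
    rw [PySem.List.mem_pyRange_one] at hi
    have hi0 : 0 ≤ i := hi.1
    have hin : i.toNat < min w1.toList.length w2.toList.length := by omega
    have htot : (w1.toList.foldl (fun d ch => d.insert ch (d.getD ch 0 + 1))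
        PySem.Dict.empty).getD (w2.toList.getD i.toNat ' ') 0
        = (w1.toList.count (w2.toList.getD i.toNat ' ') : Int) := by
      rw [PySem.Dict.foldl_insert_getD_add_one_eq_counter, PySem.Dict.getD_counter]
    have hocc : ((List.range (min w1.toList.length w2.toList.length)).map
        (fun j => (((w2.toList.take j).count (w2.toList.getD j ' ')) : Int))).getD i.toNat 0
        = ((w2.toList.take i.toNat).count (w2.toList.getD i.toNat ' ') : Int) := by
      rw [List.getD_eq_getElem _ _ (by simpa using hin)]
      simp
    simp only [htot, hocc]
  rw [List.map_congr_left hmap]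
  have hB := wordleB_eq_ref w1.toList w2.toList (min w1.toList.length w2.toList.length) 0 (by omega)
  simp only [Nat.cast_zero] at hB
  rw [hB]
  simp only [List.drop_zero, List.nil_append, List.take_zero, List.count_nil, Nat.cast_zero]
  congr 1
  funext c
  exact wordleCountA_eq w1 c
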